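-- pv_equiv track=rewrite | github.com/seonghoe5697/chess_robot | software_team/core/fen.py | _piece_at
-- ===== SOURCE A (Python) =====
-- def _piece_at(fen_rank: str, file_idx: int) -> str | None:
--     """
--     FEN 랭크 문자열에서 특정 파일(0~7)의 기물 문자를 반환합니다.
--     빈 칸이면 None 반환.
--     """
--     col = 0
--     for ch in fen_rank:
--         if ch.isdigit():
--             col += int(ch)
--         else:
--             if col == file_idx:
--                 return ch
--             col += 1
--     return None
-- ===== SOURCE B (Python) =====
-- def _piece_at(fen_rank: str, file_idx: int) -> str | None:
--     """Expand the FEN rank into a per-file list, then index it directly."""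
--     expanded = []
--     for ch in fen_rank:
--         if ch.isdigit():
--             expanded.extend([None] * int(ch))
--         else:
--             expanded.append(ch)
--     if 0 <= file_idx < len(expanded):
--         return expanded[file_idx]
--     return None
-- ===== Notes on version B (the rewrite author's own statement) =====
-- stated objective: simpler
-- what changed: Replaces the early-returning column-accumulator scan with a full expansion of the rank into a per-file list followed by one bounds-checked index lookup.
import Mathlib
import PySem

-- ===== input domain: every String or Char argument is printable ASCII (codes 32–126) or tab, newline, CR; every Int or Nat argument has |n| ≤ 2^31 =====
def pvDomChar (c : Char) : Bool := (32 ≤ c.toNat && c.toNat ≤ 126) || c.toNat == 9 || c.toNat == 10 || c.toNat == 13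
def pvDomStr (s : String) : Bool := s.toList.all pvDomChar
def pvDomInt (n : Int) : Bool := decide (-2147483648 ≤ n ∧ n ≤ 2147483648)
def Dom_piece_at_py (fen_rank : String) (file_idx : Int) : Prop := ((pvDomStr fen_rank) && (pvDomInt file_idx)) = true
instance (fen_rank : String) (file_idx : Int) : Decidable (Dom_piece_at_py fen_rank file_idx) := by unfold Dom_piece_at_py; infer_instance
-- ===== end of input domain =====

-- B replaces A's early-returning column-accumulator scan with a full expansion of the
-- rank into a per-file list plus one bounds-checked index lookup (objective: simpler).


-- ===== PORT A =====
-- ch.isdigit() for a single printable-ASCII char (exact on the stated ASCII domain)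
def pvDigit (ch : Char) : Bool := '0' ≤ ch && ch ≤ '9'
-- int(ch) for a single ASCII digit char (exact when pvDigit ch)
def pvDigitVal (ch : Char) : Int := (ch.toNat : Int) - 48

-- the for-loop with its early return, as structural recursion over the chars with the col accumulator
def pieceAtGo : List Char → Int → Int → Option String
  | [], _, _ => none
  | ch :: rest, col, file_idx =>
    if pvDigit ch then pieceAtGo rest (col + pvDigitVal ch) file_idx
    else if col = file_idx then some (String.ofList [ch])
    else pieceAtGo rest (col + 1) file_idx

def piece_at_py (fen_rank : String) (file_idx : Int) : Option String :=
  pieceAtGo fen_rank.toList 0 file_idx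

-- ===== PORT B =====
-- the expansion loop of Source B: digit ch contributes int(ch) copies of None, other ch contributes itself
def pvExpand : List Char → List (Option String)
  | [] => []
  | ch :: rest =>
    (if pvDigit ch then List.replicate (pvDigitVal ch).toNat none else [some (String.ofList [ch])])
      ++ pvExpand rest

def piece_at_py_alt (fen_rank : String) (file_idx : Int) : Option String :=
  let expanded := pvExpand fen_rank.toList
  if 0 ≤ file_idx ∧ file_idx < (expanded.length : Int) then
    expanded.getD file_idx.toNat none
  else none

-- ===== PRECONDITION & SPEC =====
def Spec_piece_at_py (fen_rank : String) (file_idx : Int) (out : Option String) : Prop := out = piece_at_py_alt fen_rank file_idx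
instance (fen_rank : String) (file_idx : Int) (out : Option String) : Decidable (Spec_piece_at_py fen_rank file_idx out) := by unfold Spec_piece_at_py; infer_instance

-- ===== CLAIM (what is proved, stated in full; the proofs are below) =====
def Claim_equal_piece_at_py : Prop := ∀ (fen_rank : String) (file_idx : Int), Dom_piece_at_py fen_rank file_idx → Spec_piece_at_py fen_rank file_idx (piece_at_py fen_rank file_idx)

-- ===== LEMMAS AND PROOFS =====

lemma pvDigitVal_nonneg {ch : Char} (h : pvDigit ch = true) : 0 ≤ pvDigitVal ch := by
  have h1 : ('0' : Char) ≤ ch := by simp [pvDigit] at h; exact h.1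
  have h2 : ('0' : Char).toNat ≤ ch.toNat := UInt32.le_iff_toNat_le.mp (Char.le_def.mp h1)
  have h48 : ('0' : Char).toNat = 48 := rfl
  unfold pvDigitVal
  omega

-- loop invariant: A's scan from column `col` equals a bounds-checked lookup at offset
-- `file_idx - col` in B's expansion of the remaining chars
lemma go_eq_expand (cs : List Char) (file_idx : Int) : ∀ col : Int,
    pieceAtGo cs col file_idx =
      (if 0 ≤ file_idx - col ∧ file_idx - col < ((pvExpand cs).length : Int) then
        (pvExpand cs).getD (file_idx - col).toNat none
      else none) := by
  induction cs with
  | nil => intro col; simp [pieceAtGo, pvExpand]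
  | cons ch rest ih =>
    intro col
    by_cases hd : pvDigit ch = true
    · have hnn := pvDigitVal_nonneg hd
      rw [pieceAtGo, if_pos hd, ih (col + pvDigitVal ch)]
      have hlen : ((pvExpand (ch :: rest)).length : Int)
          = pvDigitVal ch + ((pvExpand rest).length : Int) := by
        simp [pvExpand, hd]; omega
      by_cases h1 : 0 ≤ file_idx - (col + pvDigitVal ch) ∧
          file_idx - (col + pvDigitVal ch) < ((pvExpand rest).length : Int)
      · rw [if_pos h1, if_pos (by rw [hlen]; omega)]
        simp only [pvExpand, hd, if_pos]
        rw [List.getD, List.getD, List.getElem?_append_right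
          (by simp only [List.length_replicate]; omega)]
        have hidx : (file_idx - col).toNat
            - (List.replicate (pvDigitVal ch).toNat (none : Option String)).length
            = (file_idx - (col + pvDigitVal ch)).toNat := by
          simp only [List.length_replicate]; omega
        rw [hidx]
      · rw [if_neg h1]
        by_cases h2 : 0 ≤ file_idx - col ∧ file_idx - col < ((pvExpand (ch :: rest)).length : Int)
        · rw [if_pos h2]
          -- the index falls inside the replicate-none block
          simp only [pvExpand, hd, if_pos]
          rw [List.getD, List.getElem?_append_left (by rw [hlen] at h2; simp only [List.length_replicate]; omega)]
          simp
        · rw [if_neg h2]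
    · rw [pieceAtGo, if_neg hd]
      have hexp : pvExpand (ch :: rest) = some (String.ofList [ch]) :: pvExpand rest := by
        simp [pvExpand, hd]
      by_cases hc : col = file_idx
      · rw [if_pos hc, hexp]
        rw [if_pos (by simp; omega)]
        have : (file_idx - col).toNat = 0 := by omega
        rw [this]; rfl
      · rw [if_neg hc, ih (col + 1), hexp]
        by_cases h1 : 0 ≤ file_idx - (col + 1) ∧ file_idx - (col + 1) < ((pvExpand rest).length : Int)
        · rw [if_pos h1, if_pos (by simp; omega)]
          have : (file_idx - col).toNat = (file_idx - (col + 1)).toNat + 1 := by omega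
          rw [this]; rfl
        · rw [if_neg h1, if_neg (by simp; omega)]

-- ===== VERDICT (by name: the statement is the Claim_ definition above) =====
theorem piece_at_py_spec : Claim_equal_piece_at_py := by
  intro fen_rank file_idx _
  unfold Spec_piece_at_py piece_at_py piece_at_py_alt
  rw [go_eq_expand fen_rank.toList file_idx 0]
  simp
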